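-- pv_equiv track=rewrite | github.com/qlitre/qlitre-utils | src/qlitreutils/helper/two_dimension.py | get_max_manhattan_distance
-- ===== SOURCE A (Python) =====
-- def get_max_manhattan_distance(points: list) -> int:
--     """
--     座標リストを受け取り最大のマンハッタン距離を返す
--     """
--     x_conv = []
--     y_conv = []
--
--     for x, y in points:
--         x_conv.append(x + y)
--         y_conv.append(x - y)
--     x_dist_max = abs(max(x_conv) - min(x_conv))
--     y_dist_max = abs(max(y_conv) - min(y_conv))
--
--     return max(x_dist_max, y_dist_max)
-- ===== SOURCE B (Python) =====
-- def get_max_manhattan_distance(points: list) -> int: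
--     return max(abs(px - qx) + abs(py - qy)
--                for px, py in points
--                for qx, qy in points)
-- ===== Notes on version B (the rewrite author's own statement) =====
-- stated objective: alternative
-- what changed: B computes the answer directly from the definition as the maximum of |dx|+|dy| over all ordered pairs of points (O(n^2) brute force), instead of A's Chebyshev-transform trick via min/max of x+y and x-y; the equivalence rests on the identity |dx|+|dy| = max(|ds|,|dd|).
import Mathlib
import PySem

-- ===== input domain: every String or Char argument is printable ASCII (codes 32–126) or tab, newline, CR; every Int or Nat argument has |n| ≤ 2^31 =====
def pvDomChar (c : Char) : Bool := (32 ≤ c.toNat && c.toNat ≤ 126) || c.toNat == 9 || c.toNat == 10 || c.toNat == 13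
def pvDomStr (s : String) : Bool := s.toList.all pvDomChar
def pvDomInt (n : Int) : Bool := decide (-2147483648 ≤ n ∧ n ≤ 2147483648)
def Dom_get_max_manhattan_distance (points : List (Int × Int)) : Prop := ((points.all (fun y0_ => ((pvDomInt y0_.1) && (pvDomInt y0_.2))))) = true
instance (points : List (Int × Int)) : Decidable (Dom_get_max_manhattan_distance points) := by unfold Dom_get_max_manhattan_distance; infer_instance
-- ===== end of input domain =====

-- B replaces A's Chebyshev-transform trick (min/max of x+y and x-y) by the direct O(n^2)
-- brute force: max of |dx|+|dy| over all ordered pairs; Pre_ excludes the empty list, where both raise ValueError.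


-- ===== PORT A =====
def get_max_manhattan_distance (points : List (Int × Int)) : Int :=
  let x_conv := points.foldl (fun acc (p : Int × Int) => acc ++ [p.1 + p.2]) ([] : List Int)
  let y_conv := points.foldl (fun acc (p : Int × Int) => acc ++ [p.1 - p.2]) ([] : List Int)
  let x_dist_max := |(PySem.List.max? x_conv (fun v => v)).getD 0 - (PySem.List.min? x_conv (fun v => v)).getD 0|
  let y_dist_max := |(PySem.List.max? y_conv (fun v => v)).getD 0 - (PySem.List.min? y_conv (fun v => v)).getD 0|
  max x_dist_max y_dist_max

-- ===== PORT B =====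
-- max(<generator over all ordered pairs>); on [] the generator is empty and Python's max raises (excluded by Pre_).
def get_max_manhattan_distance_alt (points : List (Int × Int)) : Int :=
  let vals := points.flatMap (fun p => points.map (fun q => |p.1 - q.1| + |p.2 - q.2|))
  (PySem.List.max? vals (fun v => v)).getD 0

-- ===== PRECONDITION & SPEC =====
-- Pre_ excludes only the empty list, on which both A and B raise ValueError (max of empty sequence).
def Pre_get_max_manhattan_distance (points : List (Int × Int)) : Prop := points ≠ []
instance (points : List (Int × Int)) : Decidable (Pre_get_max_manhattan_distance points) := by unfold Pre_get_max_manhattan_distance; infer_instance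
def pvWitness_get_max_manhattan_distance : (List (Int × Int)) := [(0, 1), (3, -2)]

def Spec_get_max_manhattan_distance (points : List (Int × Int)) (out : Int) : Prop := out = get_max_manhattan_distance_alt points
instance (points : List (Int × Int)) (out : Int) : Decidable (Spec_get_max_manhattan_distance points out) := by unfold Spec_get_max_manhattan_distance; infer_instance

-- ===== CLAIM =====
def Claim_equal_get_max_manhattan_distance : Prop := ∀ (points : List (Int × Int)), Dom_get_max_manhattan_distance points → Pre_get_max_manhattan_distance points → Spec_get_max_manhattan_distance points (get_max_manhattan_distance points)

-- ===== LEMMAS AND PROOFS =====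

-- the Manhattan distance of a pair equals the larger of the two transform gaps
theorem pv_manhattan_eq_max (p q : Int × Int) :
    |p.1 - q.1| + |p.2 - q.2| = max |(p.1 + p.2) - (q.1 + q.2)| |(p.1 - p.2) - (q.1 - q.2)| := by
  rw [max_def]
  rcases abs_cases (p.1 - q.1) with ⟨h1, _⟩ | ⟨h1, _⟩ <;>
    rcases abs_cases (p.2 - q.2) with ⟨h2, _⟩ | ⟨h2, _⟩ <;>
    rcases abs_cases ((p.1 + p.2) - (q.1 + q.2)) with ⟨h3, _⟩ | ⟨h3, _⟩ <;>
    rcases abs_cases ((p.1 - p.2) - (q.1 - q.2)) with ⟨h4, _⟩ | ⟨h4, _⟩ <;>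
    split_ifs <;> omega

-- bounds of a projection's running min/max over h :: t
theorem pv_proj_bounds (f : Int × Int → Int) (h : Int × Int) (t : List (Int × Int))
    (x : Int × Int) (hx : x ∈ h :: t) :
    (t.map f).foldl min (f h) ≤ f x ∧ f x ≤ (t.map f).foldl max (f h) := by
  have hmin := PySem.List.foldl_min_le (t.map f) (f h)
  have hmax := PySem.List.le_foldl_max (t.map f) (f h)
  rcases List.mem_cons.mp hx with rfl | hx
  · exact ⟨hmin.1, hmax.1⟩
  · exact ⟨hmin.2 (f x) (List.mem_map.mpr ⟨x, hx, rfl⟩),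
           hmax.2 (f x) (List.mem_map.mpr ⟨x, hx, rfl⟩)⟩

-- the running max / min of a projection is attained at some list element
theorem pv_proj_max_attained (f : Int × Int → Int) (h : Int × Int) (t : List (Int × Int)) :
    ∃ x ∈ h :: t, f x = (t.map f).foldl max (f h) := by
  rcases PySem.List.foldl_max_mem (t.map f) (f h) with he | hm
  · exact ⟨h, List.mem_cons_self, he.symm⟩
  · rcases List.mem_map.mp hm with ⟨x, hx, hfx⟩
    exact ⟨x, List.mem_cons_of_mem _ hx, hfx⟩

theorem pv_proj_min_attained (f : Int × Int → Int) (h : Int × Int) (t : List (Int × Int)) :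
    ∃ x ∈ h :: t, f x = (t.map f).foldl min (f h) := by
  rcases PySem.List.foldl_min_mem (t.map f) (f h) with he | hm
  · exact ⟨h, List.mem_cons_self, he.symm⟩
  · rcases List.mem_map.mp hm with ⟨x, hx, hfx⟩
    exact ⟨x, List.mem_cons_of_mem _ hx, hfx⟩

-- the maximum of all pairwise Manhattan distances equals the larger of the two transform gaps
theorem pv_pairs_max (h : Int × Int) (t : List (Int × Int)) :
    (PySem.List.max? ((h :: t).flatMap (fun p => (h :: t).map (fun q => |p.1 - q.1| + |p.2 - q.2|))) (fun v => v)).getD 0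
      = max ((t.map (fun p => p.1 + p.2)).foldl max (h.1 + h.2) - (t.map (fun p => p.1 + p.2)).foldl min (h.1 + h.2))
            ((t.map (fun p => p.1 - p.2)).foldl max (h.1 - h.2) - (t.map (fun p => p.1 - p.2)).foldl min (h.1 - h.2)) := by
  set l := h :: t with hl
  set vals := l.flatMap (fun p => l.map (fun q => |p.1 - q.1| + |p.2 - q.2|)) with hvals
  have hmemv : ∀ p ∈ l, ∀ q ∈ l, (|p.1 - q.1| + |p.2 - q.2|) ∈ vals := by
    intro p hp q hq
    exact List.mem_flatMap.mpr ⟨p, hp, List.mem_map.mpr ⟨q, hq, rfl⟩⟩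
  have hne : vals ≠ [] := by
    intro hcontra
    exact (List.ne_nil_of_mem (hmemv h List.mem_cons_self h List.mem_cons_self)) (hcontra ▸ rfl)
  obtain ⟨m, hm⟩ : ∃ m, PySem.List.max? vals (fun v => v) = some m := by
    cases hx : PySem.List.max? vals (fun v => v) with
    | none => exact absurd ((PySem.List.max?_eq_none_iff vals (fun v => v)).mp hx) hne
    | some m => exact ⟨m, rfl⟩
  rw [hm, Option.getD_some]
  have hmmem := PySem.List.max?_mem hm
  have hmmax := PySem.List.max?_isMax hm
  apply le_antisymm
  · -- m ≤ RHS: m is some pair's distance, bounded by both gaps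
    rcases List.mem_flatMap.mp hmmem with ⟨p, hp, hmq⟩
    rcases List.mem_map.mp hmq with ⟨q, hq, hpq⟩
    have hs := pv_proj_bounds (fun p => p.1 + p.2) h t
    have hd := pv_proj_bounds (fun p => p.1 - p.2) h t
    have hsp := hs p hp; have hsq := hs q hq
    have hdp := hd p hp; have hdq := hd q hq
    rw [← hpq, pv_manhattan_eq_max p q, max_def]
    rcases abs_cases ((p.1 + p.2) - (q.1 + q.2)) with ⟨h3, _⟩ | ⟨h3, _⟩ <;>
      rcases abs_cases ((p.1 - p.2) - (q.1 - q.2)) with ⟨h4, _⟩ | ⟨h4, _⟩ <;>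
      split_ifs <;> rw [max_def] <;> split_ifs <;> omega
  · -- RHS ≤ m: both gaps are realised by an actual pair's distance
    apply max_le
    · rcases pv_proj_max_attained (fun p => p.1 + p.2) h t with ⟨p, hp, hpv⟩
      rcases pv_proj_min_attained (fun p => p.1 + p.2) h t with ⟨q, hq, hqv⟩
      have hle := hmmax _ (hmemv p hp q hq)
      rw [pv_manhattan_eq_max p q] at hle
      rcases abs_cases ((p.1 + p.2) - (q.1 + q.2)) with ⟨h3, _⟩ | ⟨h3, _⟩ <;>
        have h5 := le_max_left |(p.1 + p.2) - (q.1 + q.2)| |(p.1 - p.2) - (q.1 - q.2)| <;> omega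
    · rcases pv_proj_max_attained (fun p => p.1 - p.2) h t with ⟨p, hp, hpv⟩
      rcases pv_proj_min_attained (fun p => p.1 - p.2) h t with ⟨q, hq, hqv⟩
      have hle := hmmax _ (hmemv p hp q hq)
      rw [pv_manhattan_eq_max p q] at hle
      rcases abs_cases ((p.1 - p.2) - (q.1 - q.2)) with ⟨h4, _⟩ | ⟨h4, _⟩ <;>
        have h5 := le_max_right |(p.1 + p.2) - (q.1 + q.2)| |(p.1 - p.2) - (q.1 - q.2)| <;> omega

theorem pv_abs_max_sub_min (t : List Int) (x : Int) :
    |t.foldl max x - t.foldl min x| = t.foldl max x - t.foldl min x := by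
  have h1 := (PySem.List.foldl_min_le t x).1
  have h2 := (PySem.List.le_foldl_max t x).1
  exact abs_of_nonneg (by omega)

-- ===== VERDICT =====
theorem get_max_manhattan_distance_spec : Claim_equal_get_max_manhattan_distance := by
  intro points _ hpre
  unfold Spec_get_max_manhattan_distance
  match points with
  | [] => exact absurd rfl hpre
  | (x0, y0) :: rest =>
    have hB := pv_pairs_max (x0, y0) rest
    simp only [List.map_cons] at hB
    unfold get_max_manhattan_distance get_max_manhattan_distance_alt
    simp only [PySem.List.foldl_append_singleton_eq_map, List.nil_append,
      List.map_cons, PySem.List.max?_id_cons, PySem.List.min?_id_cons, Option.getD_some]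
    rw [pv_abs_max_sub_min, pv_abs_max_sub_min, hB]
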